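-- pv_equiv track=rewrite | github.com/amacerdem/SRC-Musical-Intelligence | Validation/v2_idyom/corpora.py | _kern_to_midi
-- ===== SOURCE A (Python) =====
-- from typing import Dict, List, Optional, Tuple
--
-- def _kern_to_midi(token: str) -> Optional[int]:
--     """Convert kern pitch token to MIDI note number."""
--     # Count pitch characters
--     pitch_chars = ""
--     for ch in token:
--         if ch.isalpha() and ch.lower() in "abcdefg":
--             pitch_chars += ch
--         elif ch in "#-":
--             pitch_chars += ch
--
--     if not pitch_chars:
--         return None
--
--     base_char = pitch_chars[0]
--     is_lower = base_char.islower()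
--     note_name = base_char.upper()
--
--     note_map = {"C": 0, "D": 2, "E": 4, "F": 5, "G": 7, "A": 9, "B": 11}
--     if note_name not in note_map:
--         return None
--
--     midi = note_map[note_name]
--
--     # Octave
--     letter_count = sum(1 for c in pitch_chars if c.isalpha())
--     if is_lower:
--         midi += 60 + (letter_count - 1) * 12  # c=60, cc=72, etc.
--     else:
--         midi += 48 - (letter_count - 1) * 12  # C=48, CC=36, etc.
--
--     # Accidentals
--     midi += pitch_chars.count("#") - pitch_chars.count("-")
--
--     return midi
-- ===== SOURCE B (Python) =====
-- def _kern_to_midi(token):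
--     """Convert kern pitch token to MIDI note number (single pass, no intermediate string)."""
--     base = None
--     letters = sharps = flats = 0
--     for ch in token:
--         if ch.isalpha() and ch.lower() in "abcdefg":
--             if base is None:
--                 base = ch
--             letters += 1
--         elif ch == '#':
--             if base is None:
--                 base = ch
--             sharps += 1
--         elif ch == '-':
--             if base is None:
--                 base = ch
--             flats += 1
--     if base is None:
--         return None
--     note_map = {"C": 0, "D": 2, "E": 4, "F": 5, "G": 7, "A": 9, "B": 11}
--     midi0 = note_map.get(base.upper())
--     if midi0 is None:
--         return None
--     if base.islower():
--         midi = midi0 + 60 + (letters - 1) * 12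
--     else:
--         midi = midi0 + 48 - (letters - 1) * 12
--     return midi + sharps - flats
-- ===== Notes on version B (the rewrite author's own statement) =====
-- stated objective: faster
-- what changed: Single fused pass over the token maintaining (first kept char, letter/sharp/flat counters) instead of building an intermediate pitch_chars string and re-scanning it three times for letter count and accidental counts.
import Mathlib
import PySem

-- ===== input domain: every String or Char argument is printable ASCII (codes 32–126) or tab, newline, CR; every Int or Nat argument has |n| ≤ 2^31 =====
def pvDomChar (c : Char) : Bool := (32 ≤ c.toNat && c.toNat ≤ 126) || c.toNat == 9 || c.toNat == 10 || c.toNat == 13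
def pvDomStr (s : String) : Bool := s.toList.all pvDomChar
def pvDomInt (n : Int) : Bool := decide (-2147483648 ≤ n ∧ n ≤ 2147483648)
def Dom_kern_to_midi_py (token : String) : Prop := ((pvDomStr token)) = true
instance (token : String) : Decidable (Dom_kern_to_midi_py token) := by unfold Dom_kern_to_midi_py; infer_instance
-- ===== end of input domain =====

-- B fuses A's four scans (build pitch_chars, letter count, '#' count, '-' count) into one pass; objective: faster by constant factor.

-- ===== PORT A =====
-- 'ch.isalpha() and ch.lower() in "abcdefg"' (exact on the ASCII domain; single-char membership = char membership)
def pvIsPitch (ch : Char) : Bool :=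
  PySem.Chars.isalpha ch && (PySem.Chars.lowerChar ch ∈ ['a','b','c','d','e','f','g'])

def pvNoteMap : List (Char × Int) :=
  [('C', 0), ('D', 2), ('E', 4), ('F', 5), ('G', 7), ('A', 9), ('B', 11)]

def kern_to_midi_py (token : String) : Option Int :=
  let pitch_chars : List Char :=
    token.toList.foldl (fun acc ch =>
      if pvIsPitch ch then acc ++ [ch]
      else if ch ∈ ['#', '-'] then acc ++ [ch]
      else acc) []
  match pitch_chars with
  | [] => none
  | base_char :: _ =>
    let is_lower := PySem.Chars.islower base_char
    let note_name := PySem.Chars.upperChar base_char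
    match List.lookup note_name pvNoteMap with
    | none => none
    | some midi0 =>
      let letter_count : Int := (pitch_chars.countP PySem.Chars.isalpha : Int)
      let midi1 : Int :=
        if is_lower then midi0 + (60 + (letter_count - 1) * 12)
        else midi0 + (48 - (letter_count - 1) * 12)
      some (midi1 + ((PySem.List.count pitch_chars '#' : Int) - (PySem.List.count pitch_chars '-' : Int)))

-- ===== PORT B =====
def pvStepB (st : Option Char × Int × Int × Int) (ch : Char) : Option Char × Int × Int × Int :=
  let (base, letters, sharps, flats) := st
  if pvIsPitch ch then (some (base.getD ch), letters + 1, sharps, flats)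
  else if ch = '#' then (some (base.getD ch), letters, sharps + 1, flats)
  else if ch = '-' then (some (base.getD ch), letters, sharps, flats + 1)
  else st

def kern_to_midi_py_alt (token : String) : Option Int :=
  let st := token.toList.foldl pvStepB (none, 0, 0, 0)
  match st.1 with
  | none => none
  | some base =>
    match List.lookup (PySem.Chars.upperChar base) pvNoteMap with
    | none => none
    | some midi0 =>
      let midi : Int :=
        if PySem.Chars.islower base then midi0 + (60 + (st.2.1 - 1) * 12)
        else midi0 + (48 - (st.2.1 - 1) * 12)
      some (midi + st.2.2.1 - st.2.2.2)

-- ===== PRECONDITION & SPEC =====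
def Spec_kern_to_midi_py (token : String) (out : Option Int) : Prop := out = kern_to_midi_py_alt token
instance (token : String) (out : Option Int) : Decidable (Spec_kern_to_midi_py token out) := by unfold Spec_kern_to_midi_py; infer_instance

-- ===== CLAIM (what is proved, stated in full; the proofs are below) =====
def Claim_equal_kern_to_midi_py : Prop := ∀ (token : String), Dom_kern_to_midi_py token → Spec_kern_to_midi_py token (kern_to_midi_py token)

-- ===== LEMMAS AND PROOFS =====
def pvKeep (ch : Char) : Bool := pvIsPitch ch || ch == '#' || ch == '-'

theorem pv_foldA (l : List Char) (acc : List Char) :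
    l.foldl (fun acc ch =>
      if pvIsPitch ch then acc ++ [ch]
      else if ch ∈ ['#', '-'] then acc ++ [ch]
      else acc) acc = acc ++ l.filter pvKeep := by
  induction l generalizing acc with
  | nil => simp
  | cons ch l ih =>
    rw [List.foldl_cons]
    by_cases hp : pvIsPitch ch
    · rw [if_pos hp, ih]
      have hkeep : pvKeep ch = true := by simp [pvKeep, hp]
      simp [hkeep]
    · by_cases hk : ch ∈ ['#', '-']
      · have hk' : ch = '#' ∨ ch = '-' := by simpa using hk
        rw [if_neg hp, if_pos hk, ih]
        have hkeep : pvKeep ch = true := by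
          rcases hk' with rfl | rfl <;> simp [pvKeep]
        simp [hkeep]
      · have hk' : ¬ch = '#' ∧ ¬ch = '-' := by simpa using hk
        rw [if_neg hp, if_neg hk, ih]
        have hkeep : pvKeep ch = false := by simp [pvKeep, hp, hk'.1, hk'.2]
        simp [hkeep]

theorem pv_pitch_ne (ch : Char) (h : pvIsPitch ch = true) : ch ≠ '#' ∧ ch ≠ '-' := by
  constructor <;> rintro rfl <;> revert h <;> decide

theorem pv_foldB (l : List Char) (b : Option Char) (L S F : Int) :
    l.foldl pvStepB (b, L, S, F) =
      (b.or ((l.filter pvKeep).head?),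
        L + (l.countP pvIsPitch : Int),
        S + (l.count '#' : Int),
        F + (l.count '-' : Int)) := by
  induction l generalizing b L S F with
  | nil => simp
  | cons ch l ih =>
    rw [List.foldl_cons]
    by_cases hp : pvIsPitch ch
    · obtain ⟨h1, h2⟩ := pv_pitch_ne ch hp
      have hstep : pvStepB (b, L, S, F) ch = (some (b.getD ch), L + 1, S, F) := by
        simp [pvStepB, hp]
      have hkeep : pvKeep ch = true := by simp [pvKeep, hp]
      rw [hstep, ih]
      simp [hkeep, hp, h1, h2]
      omega
    · by_cases h1 : ch = '#'
      · subst h1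
        have hstep : pvStepB (b, L, S, F) '#' = (some (b.getD '#'), L, S + 1, F) := by
          simp [pvStepB, hp]
        have hkeep : pvKeep '#' = true := by simp [pvKeep]
        rw [hstep, ih]
        simp [hkeep, hp]
        omega
      · by_cases h2 : ch = '-'
        · subst h2
          have hstep : pvStepB (b, L, S, F) '-' = (some (b.getD '-'), L, S, F + 1) := by
            simp [pvStepB, hp, h1]
          have hkeep : pvKeep '-' = true := by simp [pvKeep]
          rw [hstep, ih]
          simp [hkeep, hp, h1]
          omega
        · have hstep : pvStepB (b, L, S, F) ch = (b, L, S, F) := by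
            simp [pvStepB, hp, h1, h2]
          have hkeep : pvKeep ch = false := by simp [pvKeep, hp, h1, h2]
          rw [hstep, ih]
          simp [hkeep, hp, h1, h2]

theorem pv_alpha_and_keep (c : Char) : (PySem.Chars.isalpha c && pvKeep c) = pvIsPitch c := by
  by_cases ha : PySem.Chars.isalpha c = true
  · have h1 : c ≠ '#' := by rintro rfl; revert ha; decide
    have h2 : c ≠ '-' := by rintro rfl; revert ha; decide
    have e1 : (c == '#') = false := beq_eq_false_iff_ne.mpr h1
    have e2 : (c == '-') = false := beq_eq_false_iff_ne.mpr h2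
    simp [pvKeep, pvIsPitch, ha, e1, e2]
  · have ha' : PySem.Chars.isalpha c = false := by simpa using ha
    simp [pvKeep, pvIsPitch, ha']

theorem pv_count_filter (l : List Char) (a : Char) (h : pvKeep a = true) :
    (l.filter pvKeep).count a = l.count a := by
  induction l with
  | nil => rfl
  | cons x l ih =>
    by_cases hx : pvKeep x = true
    · simp [hx, List.count_cons, ih]
    · have hxa : (x == a) = false := by
        refine beq_eq_false_iff_ne.mpr ?_
        rintro rfl; exact hx h
      simp [hx, List.count_cons, hxa, ih]

theorem pv_countP_alpha_filter (l : List Char) :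
    (l.filter pvKeep).countP PySem.Chars.isalpha = l.countP pvIsPitch := by
  induction l with
  | nil => rfl
  | cons x l ih =>
    have key := pv_alpha_and_keep x
    by_cases hx : pvKeep x = true
    · simp only [List.filter_cons, hx, if_true, List.countP_cons, ih]
      rw [← key, hx]
      simp
    · have hx' : pvKeep x = false := by simpa using hx
      have hpx : pvIsPitch x = false := by rw [← key, hx']; simp
      simp [hx', hpx, ih]

-- ===== VERDICT (by name: the statement is the Claim_ definition above) =====
theorem kern_to_midi_py_spec : Claim_equal_kern_to_midi_py := by
  intro token _
  unfold Spec_kern_to_midi_py kern_to_midi_py kern_to_midi_py_alt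
  rw [pv_foldA, pv_foldB]
  simp only [List.nil_append, Option.none_or]
  have hL := pv_countP_alpha_filter token.toList
  have hS := pv_count_filter token.toList '#' (by decide)
  have hF := pv_count_filter token.toList '-' (by decide)
  cases hk : token.toList.filter pvKeep with
  | nil => rfl
  | cons base rest =>
    rw [hk] at hL hS hF
    simp only [List.head?_cons]
    cases List.lookup (PySem.Chars.upperChar base) pvNoteMap with
    | none => rfl
    | some midi0 =>
      simp only [hL, zero_add, Option.some.injEq]
      by_cases hlow : PySem.Chars.islower base = true <;> simp [hlow] <;> omega
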